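-- pv_equiv track=rewrite | github.com/yupupup/ccfhw2025 | scripts/parameter-analyzer/parse_flags.py | remove_preprocessor_defs
-- ===== SOURCE A (Python) =====
-- def remove_preprocessor_defs(text):
--     """
--     Removes multi-line and single-line #define blocks from the text.
--     """
--     lines = text.splitlines()
--     output_lines = []
--     in_define = False
--     for line in lines:
--         stripped = line.strip()
--         if stripped.startswith("#define"):
--             in_define = stripped.endswith('\\')
--         elif in_define:
--             in_define = stripped.endswith('\\')
--         else:
--             output_lines.append(line)
--     return "\n".join(output_lines)
-- ===== SOURCE B (Python) =====
-- def remove_preprocessor_defs(text):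
--     """
--     Removes multi-line and single-line #define blocks from the text.
--     """
--     lines = text.splitlines()
--     output_lines = []
--     i, n = 0, len(lines)
--     while i < n:
--         line = lines[i]
--         if line.strip().startswith("#define"):
--             # skip the whole block: continuation lines, then its final line
--             while lines[i].strip().endswith('\\') and i + 1 < n:
--                 i += 1
--             i += 1
--         else:
--             output_lines.append(line)
--             i += 1
--     return "\n".join(output_lines)
-- ===== Notes on version B (the rewrite author's own statement) =====
-- stated objective: alternative
-- what changed: Replaces the boolean in_define state machine threaded through a single for-loop with an index-based outer while-loop that, on seeing a '#define' line, consumes the whole block (continuation lines plus its final line) in an inner while-loop.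
import Mathlib
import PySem

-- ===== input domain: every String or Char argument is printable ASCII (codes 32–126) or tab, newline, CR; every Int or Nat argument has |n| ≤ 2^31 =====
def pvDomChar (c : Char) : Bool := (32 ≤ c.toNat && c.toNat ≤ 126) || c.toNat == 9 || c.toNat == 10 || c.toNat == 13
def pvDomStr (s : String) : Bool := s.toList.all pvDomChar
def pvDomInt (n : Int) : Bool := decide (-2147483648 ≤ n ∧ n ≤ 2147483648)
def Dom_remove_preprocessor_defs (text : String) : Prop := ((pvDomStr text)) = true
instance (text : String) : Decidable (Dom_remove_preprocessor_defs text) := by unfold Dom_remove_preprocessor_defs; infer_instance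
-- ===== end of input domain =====

-- B replaces A's boolean state machine with an index/suffix-based outer loop and an
-- inner block-skipping loop; same O(n) cost, different decomposition.

-- ===== PORT A =====
-- the for-loop over lines with state (output_lines, in_define)
def removeA_loop (lines : List String) (output : List String) (in_define : Bool) : List String :=
  match lines with
  | [] => output
  | line :: rest =>
    let stripped := PySem.Str.strip line
    if PySem.Str.startswith stripped "#define" then
      removeA_loop rest output (PySem.Str.endswith stripped "\\")
    else if in_define then
      removeA_loop rest output (PySem.Str.endswith stripped "\\")
    else
      removeA_loop rest (output ++ [line]) in_define

def remove_preprocessor_defs (text : String) : String :=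
  PySem.Str.join "\n" (removeA_loop (PySem.Str.splitlines text) [] false)

-- ===== PORT B =====
-- the inner while-loop: skip continuation lines while they end with '\' and more
-- lines remain, then skip the block's final line (here: the list suffix after it)
def skipBlock (lines : List String) : List String :=
  match lines with
  | [] => []
  | l :: rest =>
    if PySem.Str.endswith (PySem.Str.strip l) "\\" ∧ rest ≠ [] then skipBlock rest
    else rest

theorem skipBlock_length_lt (l : String) (rest : List String) :
    (skipBlock (l :: rest)).length < (l :: rest).length := by
  induction rest generalizing l with
  | nil => simp [skipBlock]
  | cons r rs ih =>
    rw [skipBlock]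
    split
    · exact Nat.lt_trans (ih r) (by simp)
    · simp

-- the outer while-loop over the remaining suffix of lines
def removeB_loop (lines : List String) : List String :=
  match lines with
  | [] => []
  | l :: rest =>
    if PySem.Str.startswith (PySem.Str.strip l) "#define" then
      removeB_loop (skipBlock (l :: rest))
    else
      l :: removeB_loop rest
termination_by lines.length
decreasing_by
  · exact skipBlock_length_lt l rest
  · simp

def remove_preprocessor_defs_alt (text : String) : String :=
  PySem.Str.join "\n" (removeB_loop (PySem.Str.splitlines text))

-- ===== PRECONDITION & SPEC =====
def Spec_remove_preprocessor_defs (text : String) (out : String) : Prop := out = remove_preprocessor_defs_alt text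
instance (text : String) (out : String) : Decidable (Spec_remove_preprocessor_defs text out) := by unfold Spec_remove_preprocessor_defs; infer_instance

-- ===== CLAIM (what is proved, stated in full; the proofs are below) =====
def Claim_equal_remove_preprocessor_defs : Prop := ∀ (text : String), Dom_remove_preprocessor_defs text → Spec_remove_preprocessor_defs text (remove_preprocessor_defs text)

-- ===== LEMMAS AND PROOFS =====

-- in state in_define = true, A drops the line and its new state is the line's continuation flag
theorem stepA_true (l : String) (rest : List String) (out : List String) :
    removeA_loop (l :: rest) out true
      = removeA_loop rest out (PySem.Str.endswith (PySem.Str.strip l) "\\") := by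
  rw [removeA_loop]
  by_cases h : PySem.Str.startswith (PySem.Str.strip l) "#define" = true <;> simp

-- A in state in_define = true consumes exactly the lines skipBlock drops, emitting nothing
theorem removeA_loop_true (lines : List String) (out : List String) :
    removeA_loop lines out true = removeA_loop (skipBlock lines) out false := by
  induction lines generalizing out with
  | nil => simp [skipBlock, removeA_loop]
  | cons l rest ih =>
    rw [stepA_true, skipBlock]
    by_cases he : PySem.Str.endswith (PySem.Str.strip l) "\\" = true
    · by_cases hr : rest = []
      · subst hr; simp [removeA_loop]
      · rw [if_pos ⟨he, hr⟩, he]; exact ih out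
    · rw [if_neg (by simp_all), (by simp_all :
        PySem.Str.endswith (PySem.Str.strip l) "\\" = false)]

theorem skipBlock_length_le (lines : List String) :
    (skipBlock lines).length ≤ lines.length := by
  cases lines with
  | nil => simp [skipBlock]
  | cons l rest => exact Nat.le_of_lt (skipBlock_length_lt l rest)

-- main invariant: A's accumulator run equals out ++ B's suffix run
theorem loop_eq (lines : List String) (out : List String) :
    removeA_loop lines out false = out ++ removeB_loop lines := by
  induction hn : lines.length using Nat.strong_induction_on generalizing lines out with
  | _ n ih =>
  cases lines with
  | nil => simp [removeA_loop, removeB_loop]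
  | cons l rest =>
    have hrlt : rest.length < n := by subst hn; simp
    rw [removeA_loop, removeB_loop]
    by_cases hs : PySem.Str.startswith (PySem.Str.strip l) "#define" = true
    · rw [if_pos hs, if_pos hs, skipBlock]
      by_cases he : PySem.Str.endswith (PySem.Str.strip l) "\\" = true
      · by_cases hr : rest = []
        · subst hr
          rw [if_neg (by simp), he]
          simp [removeA_loop, removeB_loop]
        · rw [if_pos ⟨he, hr⟩, he, removeA_loop_true]
          exact ih (skipBlock rest).length
            (Nat.lt_of_le_of_lt (skipBlock_length_le rest) hrlt) _ _ rfl
      · rw [if_neg (by simp_all),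
          (by simp_all : PySem.Str.endswith (PySem.Str.strip l) "\\" = false)]
        exact ih rest.length hrlt _ _ rfl
    · rw [if_neg hs, if_neg hs, if_neg (by simp)]
      rw [ih rest.length hrlt _ _ rfl]
      simp

-- ===== VERDICT (by name: the statement is the Claim_ definition above) =====
theorem remove_preprocessor_defs_spec : Claim_equal_remove_preprocessor_defs := by
  intro text _
  unfold Spec_remove_preprocessor_defs remove_preprocessor_defs remove_preprocessor_defs_alt
  rw [loop_eq]
  simp
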